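-- pv_equiv track=rewrite | github.com/mach-hub-g1/ACC45DAYSOFCODE-2024 | Day22-DPOLY.py | find_degree_of_polynomial
-- ===== SOURCE A (Python) =====
-- def find_degree_of_polynomial(test_cases):
--     results = []
--     for case in test_cases:
--         N, coefficients = case
--         degree = -1
--         for i in range(N - 1, -1, -1):
--             if coefficients[i] != 0:
--                 degree = i
--                 break
--         results.append(degree)
--     return results
-- ===== SOURCE B (Python) =====
-- def find_degree_of_polynomial(test_cases):
--     results = []
--     for N, coefficients in test_cases:
--         degree = -1
--         for i in range(N):
--             if coefficients[i] != 0: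
--                 degree = i
--         results.append(degree)
--     return results
-- ===== Notes on version B (the rewrite author's own statement) =====
-- stated objective: idiomatic
-- what changed: Per case B scans the coefficients forward over range(N) keeping the last nonzero index, instead of A's backward countdown with an early break.
import Mathlib
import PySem

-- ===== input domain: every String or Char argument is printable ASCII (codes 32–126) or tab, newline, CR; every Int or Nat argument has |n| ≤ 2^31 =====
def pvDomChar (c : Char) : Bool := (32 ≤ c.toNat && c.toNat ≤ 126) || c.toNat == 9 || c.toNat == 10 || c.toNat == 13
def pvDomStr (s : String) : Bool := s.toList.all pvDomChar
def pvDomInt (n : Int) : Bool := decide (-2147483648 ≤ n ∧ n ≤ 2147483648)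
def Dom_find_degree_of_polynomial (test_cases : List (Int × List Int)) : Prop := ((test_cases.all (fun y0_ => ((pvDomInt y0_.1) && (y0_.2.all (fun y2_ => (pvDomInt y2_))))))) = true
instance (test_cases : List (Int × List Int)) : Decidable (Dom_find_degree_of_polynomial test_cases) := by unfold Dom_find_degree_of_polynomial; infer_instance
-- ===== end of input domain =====

-- B replaces A's backward countdown-with-break by a forward full scan keeping the last
-- nonzero index (idiomatic, same cost); return-value equivalence on cases with N ≤ len(coefficients).

-- ===== PORT A =====
-- A's inner loop: walk the countdown list range(N-1, -1, -1); first nonzero coefficient breaks.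
-- coefficients[i] is ported as (pyGet? …).getD 0: inside Pre_ every visited index is in range,
-- so the default is never taken (outside Pre_ Python raises IndexError and nothing is claimed).
def pvLoopA (coefficients : List Int) : List Int → Int → Int
  | [], degree => degree
  | i :: rest, degree =>
      if (PySem.List.pyGet? coefficients i).getD 0 ≠ 0 then i
      else pvLoopA coefficients rest degree

def find_degree_of_polynomial (test_cases : List (Int × List Int)) : List Int :=
  test_cases.foldl
    (fun results case =>
      results ++ [pvLoopA case.2 (PySem.List.pyRange (case.1 - 1) (-1) (-1)) (-1)])
    []

-- ===== PORT B =====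
-- B's inner loop: forward scan over range(N), degree := i whenever coefficients[i] != 0.
def find_degree_of_polynomial_alt (test_cases : List (Int × List Int)) : List Int :=
  test_cases.foldl
    (fun results case =>
      results ++
        [(PySem.List.pyRange 0 case.1 1).foldl
          (fun degree i =>
            if (PySem.List.pyGet? case.2 i).getD 0 ≠ 0 then i else degree)
          (-1)])
    []

-- ===== PRECONDITION & SPEC =====
-- Pre_ excludes exactly the cases where Python A raises IndexError: N exceeding the
-- number of coefficients (B raises IndexError there too).
def Pre_find_degree_of_polynomial (test_cases : List (Int × List Int)) : Prop :=
  ∀ c ∈ test_cases, c.1 ≤ (c.2.length : Int)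
instance (test_cases : List (Int × List Int)) : Decidable (Pre_find_degree_of_polynomial test_cases) := by unfold Pre_find_degree_of_polynomial; infer_instance
def pvWitness_find_degree_of_polynomial : (List (Int × List Int)) := [(3, [1, 0, 2]), (0, []), (2, [0, 0, 5])]
def Spec_find_degree_of_polynomial (test_cases : List (Int × List Int)) (out : List Int) : Prop := out = find_degree_of_polynomial_alt test_cases
instance (test_cases : List (Int × List Int)) (out : List Int) : Decidable (Spec_find_degree_of_polynomial test_cases out) := by unfold Spec_find_degree_of_polynomial; infer_instance

-- ===== CLAIM (what is proved, stated in full; the proofs are below) =====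
def Claim_equal_find_degree_of_polynomial : Prop := ∀ (test_cases : List (Int × List Int)), Dom_find_degree_of_polynomial test_cases → Pre_find_degree_of_polynomial test_cases → Spec_find_degree_of_polynomial test_cases (find_degree_of_polynomial test_cases)

-- ===== LEMMAS AND PROOFS =====

-- A's break-loop splits over append: search the first part, fall through to the second.
theorem pvLoopA_append (c : List Int) (l₁ l₂ : List Int) (d : Int) :
    pvLoopA c (l₁ ++ l₂) d = pvLoopA c l₁ (pvLoopA c l₂ d) := by
  induction l₁ with
  | nil =>
      simp [pvLoopA]
  | cons x t ih =>
      by_cases h : (PySem.List.pyGet? c x).getD 0 ≠ 0 <;>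
        simp [pvLoopA, h, ih]

-- B's forward fold over a list equals A's break-loop over its reverse.
theorem pvFoldl_eq_loopA_reverse (c : List Int) (l : List Int) (d : Int) :
    l.foldl (fun degree i => if (PySem.List.pyGet? c i).getD 0 ≠ 0 then i else degree) d
      = pvLoopA c l.reverse d := by
  induction l generalizing d with
  | nil => simp [pvLoopA]
  | cons x t ih =>
      simp only [List.foldl_cons, List.reverse_cons, pvLoopA_append, pvLoopA]
      rw [ih]

-- Per-case agreement: the countdown range is the reverse of the forward range.
theorem pvCase_eq (c : List Int) (n : Int) :
    pvLoopA c (PySem.List.pyRange (n - 1) (-1) (-1)) (-1)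
      = (PySem.List.pyRange 0 n 1).foldl
          (fun degree i => if (PySem.List.pyGet? c i).getD 0 ≠ 0 then i else degree) (-1) := by
  rw [pvFoldl_eq_loopA_reverse, PySem.List.pyRange_neg_one_eq_reverse]
  norm_num

-- ===== VERDICT (by name: the statement is the Claim_ definition above) =====
theorem find_degree_of_polynomial_spec : Claim_equal_find_degree_of_polynomial := by
  intro test_cases _ _
  unfold Spec_find_degree_of_polynomial find_degree_of_polynomial find_degree_of_polynomial_alt
  induction test_cases using List.reverseRecOn with
  | nil => rfl
  | append_singleton t c ih =>
      simp only [List.foldl_append, List.foldl_cons, List.foldl_nil, pvCase_eq]
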